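-- pv_equiv track=rewrite | github.com/aaFurze/Reed-Scraper | src/formatting.py | format_job_location
-- ===== SOURCE A (Python) =====
-- def format_job_location(location_raw: str) -> str:
--     output_location = " "
--     for char in location_raw:
--         if char.isalnum() or char in [",", "-"]:
--             output_location += char
--         if char == " " and output_location[-1] != " ":
--             output_location += char
--     return output_location.strip()
-- ===== SOURCE B (Python) =====
-- def format_job_location(location_raw: str) -> str:
--     kept = "".join(c for c in location_raw if c.isalnum() or c in ",- ")
--     return " ".join(kept.split())
-- ===== Notes on version B (the rewrite author's own statement) =====
-- stated objective: idiomatic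
-- what changed: Replaces A's single stateful scan (which appends conditionally on the last emitted character) with a character-filter comprehension followed by the idiomatic split/join whitespace normalisation.
import Mathlib
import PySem

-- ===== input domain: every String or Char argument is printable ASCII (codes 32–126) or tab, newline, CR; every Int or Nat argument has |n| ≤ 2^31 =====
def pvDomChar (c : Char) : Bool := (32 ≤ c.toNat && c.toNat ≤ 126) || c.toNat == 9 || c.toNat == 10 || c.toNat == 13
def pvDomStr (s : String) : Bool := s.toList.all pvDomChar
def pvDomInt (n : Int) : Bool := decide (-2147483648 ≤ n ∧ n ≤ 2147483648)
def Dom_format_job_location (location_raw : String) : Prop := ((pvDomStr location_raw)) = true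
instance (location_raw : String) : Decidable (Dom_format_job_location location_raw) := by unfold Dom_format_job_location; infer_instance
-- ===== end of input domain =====

-- B replaces A's single stateful scan (which inspects the last emitted character) with an
-- idiomatic filter comprehension followed by " ".join(kept.split()) whitespace normalisation.

-- ===== PORT A =====
-- one loop iteration of A: append kept chars; append a space only if the last char is not a space
def pvStepA (out : List Char) (c : Char) : List Char :=
  let out := if PySem.Chars.isalnum c || c == ',' || c == '-' then out ++ [c] else out
  if c == ' ' && !(PySem.List.pyGet? out (-1) == some ' ') then out ++ [c] else out

def format_job_location (location_raw : String) : String :=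
  PySem.Str.strip (String.ofList (location_raw.toList.foldl pvStepA [' ']))

-- ===== PORT B =====
def format_job_location_alt (location_raw : String) : String :=
  let kept := String.ofList (location_raw.toList.filter
    (fun c => PySem.Chars.isalnum c || c == ',' || c == '-' || c == ' '))
  PySem.Str.join " " (PySem.Str.split₀ kept)

-- ===== PRECONDITION & SPEC =====
def Spec_format_job_location (location_raw : String) (out : String) : Prop := out = format_job_location_alt location_raw
instance (location_raw : String) (out : String) : Decidable (Spec_format_job_location location_raw out) := by unfold Spec_format_job_location; infer_instance

-- ===== CLAIM (what is proved, stated in full; the proofs are below) =====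
def Claim_equal_format_job_location : Prop := ∀ (location_raw : String), Dom_format_job_location location_raw → Spec_format_job_location location_raw (format_job_location location_raw)

-- ===== LEMMAS AND PROOFS =====

-- the characters B keeps
def pvKeep (c : Char) : Bool := PySem.Chars.isalnum c || c == ',' || c == '-' || c == ' '

-- what A's loop emits, as a function of the kept characters and an "after a space?" flag
def pvG : List Char → Bool → List Char
  | [], _ => []
  | c :: cs, after =>
      if c == ' ' then (if after then pvG cs true else ' ' :: pvG cs true)
      else c :: pvG cs false

-- accumulator-free form of PySem.Chars.split₀.go
def pvWords : List Char → List Char → List (List Char)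
  | [], cur => if cur.isEmpty then [] else [cur.reverse]
  | c :: r, cur =>
      if PySem.Chars.isspace c then
        (if cur.isEmpty then pvWords r [] else cur.reverse :: pvWords r [])
      else pvWords r (c :: cur)

-- on the ASCII domain, a kept character is whitespace iff it is the space character
lemma pvKeep_isspace (c : Char) (hd : pvDomChar c = true) (hk : pvKeep c = true) :
    PySem.Chars.isspace c = (c == ' ') := by
  have hlt : c.toNat < 128 := by
    simp only [pvDomChar, Bool.or_eq_true, Bool.and_eq_true, decide_eq_true_eq, beq_iff_eq] at hd
    omega
  have hall : ∀ n : Fin 128, pvKeep (Char.ofNat n.val) = true →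
      PySem.Chars.isspace (Char.ofNat n.val) = (Char.ofNat n.val == ' ') := by decide
  have hc : Char.ofNat c.toNat = c := Char.ofNat_toNat c
  have := hall ⟨c.toNat, hlt⟩
  rw [hc] at this
  exact this hk

lemma foldA_g (l : List Char) : ∀ acc : List Char, acc ≠ [] →
    l.foldl pvStepA acc = acc ++ pvG (l.filter pvKeep) (PySem.List.pyGet? acc (-1) == some ' ') := by
  induction l with
  | nil => intro acc h; simp [pvG]
  | cons c r ih =>
      intro acc hacc
      by_cases hc : c = ' '
      · subst hc
        have ha : PySem.Chars.isalnum ' ' = false := by decide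
        rcases hb : (PySem.List.pyGet? acc (-1) == some ' ') with _ | _
        · have hst : pvStepA acc ' ' = acc ++ [' '] := by
            simp [pvStepA, ha, hb]
          rw [List.foldl_cons, hst, ih _ (by simp)]
          have hk : pvKeep ' ' = true := by decide
          simp [hk, pvG]
        · have hst : pvStepA acc ' ' = acc := by simp [pvStepA, ha, hb]
          rw [List.foldl_cons, hst, ih _ hacc]
          have hk : pvKeep ' ' = true := by decide
          simp [hk, pvG, hb]
      · have hc' : (c == ' ') = false := by simpa using hc
        by_cases hk : pvKeep c = true
        · have hpred : (PySem.Chars.isalnum c || c == ',' || c == '-') = true := by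
            simp only [pvKeep, hc', Bool.or_false] at hk
            exact hk
          have hst : pvStepA acc c = acc ++ [c] := by simp [pvStepA, hpred, hc']
          rw [List.foldl_cons, hst, ih _ (by simp)]
          simp [hk, pvG, hc']
        · have hk' : pvKeep c = false := by simpa using hk
          have hpred : (PySem.Chars.isalnum c || c == ',' || c == '-') = false := by
            simp only [pvKeep, hc', Bool.or_false] at hk'
            exact hk'
          have hst : pvStepA acc c = acc := by simp [pvStepA, hpred, hc']
          rw [List.foldl_cons, hst, ih _ hacc]
          simp [hk']

lemma go_eq_words (m : List Char) : ∀ cur acc,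
    PySem.Chars.split₀.go m cur acc = acc.reverse ++ pvWords m cur := by
  induction m with
  | nil =>
      intro cur acc
      by_cases h : cur.isEmpty <;>
        simp [PySem.Chars.split₀.go, pvWords, h]
  | cons c r ih =>
      intro cur acc
      by_cases hs : PySem.Chars.isspace c
      · by_cases h : cur.isEmpty <;>
          simp [PySem.Chars.split₀.go, pvWords, hs, h, ih]
      · simp [PySem.Chars.split₀.go, pvWords, hs, ih]

lemma pvWords_ne_nil (m : List Char) : ∀ cur w, w ∈ pvWords m cur → w ≠ [] := by
  induction m with
  | nil =>
      intro cur w hw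
      by_cases h : cur.isEmpty <;> simp [pvWords, h] at hw
      · subst hw
        simpa [List.isEmpty_iff] using h
  | cons c r ih =>
      intro cur w hw
      by_cases hs : PySem.Chars.isspace c
      · by_cases h : cur.isEmpty
        · exact ih [] w (by simpa [pvWords, hs, h] using hw)
        · simp [pvWords, hs, h] at hw
          rcases hw with hw | hw
          · subst hw; simpa [List.isEmpty_iff] using h
          · exact ih [] w hw
      · exact ih (c :: cur) w (by simpa [pvWords, hs] using hw)
lemma rstrip_cons_space (z : List Char) :
    PySem.Chars.rstrip (' ' :: z) =
      if PySem.Chars.rstrip z = [] then [] else ' ' :: PySem.Chars.rstrip z := by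
  simp only [PySem.Chars.rstrip, List.reverse_cons, List.dropWhile_append]
  rcases h : List.dropWhile PySem.Chars.isspace z.reverse with _ | ⟨a, t⟩
  · simp [show PySem.Chars.isspace ' ' = true from by decide]
  · simp
lemma rstrip_append_nonspace (x y : List Char) (hx : ∀ c ∈ x, PySem.Chars.isspace c = false) :
    PySem.Chars.rstrip (x ++ y) =
      if PySem.Chars.rstrip y = [] then x else x ++ PySem.Chars.rstrip y := by
  have hx' : List.dropWhile PySem.Chars.isspace x.reverse = x.reverse := by
    rw [List.dropWhile_eq_self_iff]
    intro h hp
    have := hx _ (List.mem_reverse.mp (List.getElem_mem h))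
    simp only [List.getElem_reverse, Nat.sub_zero] at this
    simp [this] at hp
  simp only [PySem.Chars.rstrip, List.reverse_append, List.dropWhile_append, hx']
  rcases h : List.dropWhile PySem.Chars.isspace y.reverse with _ | ⟨a, t⟩
  · simp
  · simp
lemma rstrip_nonspace (x : List Char) (hx : ∀ c ∈ x, PySem.Chars.isspace c = false) :
    PySem.Chars.rstrip x = x := by
  have := rstrip_append_nonspace x [] hx
  simpa [PySem.Chars.rstrip] using this
lemma intercalate_words_eq (m : List Char) (hm : ∀ c ∈ m, PySem.Chars.isspace c = (c == ' ')) :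
    ∀ cur, (∀ c ∈ cur, PySem.Chars.isspace c = false) →
    List.intercalate [' '] (pvWords m cur) =
      PySem.Chars.rstrip (cur.reverse ++ pvG m cur.isEmpty) := by
  induction m with
  | nil =>
      intro cur hcur
      rcases cur with _ | ⟨d, t⟩
      · simp [pvWords, pvG, PySem.Chars.rstrip, List.intercalate]
      · have hx : ∀ c ∈ (d :: t).reverse, PySem.Chars.isspace c = false := by
          intro c hcm; exact hcur c (List.mem_reverse.mp hcm)
        rw [pvWords, pvG]
        simp only [List.isEmpty_cons, Bool.false_eq_true, if_false, List.append_nil]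
        rw [rstrip_nonspace _ hx]
        simp [List.intercalate]
  | cons c r ih =>
      intro cur hcur
      have hmc := hm c (List.mem_cons_self)
      have hm' : ∀ x ∈ r, PySem.Chars.isspace x = (x == ' ') := fun x hx => hm x (List.mem_cons_of_mem _ hx)
      by_cases hc : c = ' '
      · subst hc
        have hs : PySem.Chars.isspace ' ' = true := by decide
        rcases cur with _ | ⟨d, t⟩
        · simpa [pvWords, pvG, hs] using ih hm' [] (by simp)
        · have hx : ∀ x ∈ (d :: t).reverse, PySem.Chars.isspace x = false := by
            intro x hxm; exact hcur x (List.mem_reverse.mp hxm)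
          rw [pvWords, pvG]
          simp only [hs, if_true, List.isEmpty_cons, if_false, Bool.false_eq_true, beq_self_eq_true]
          rw [rstrip_append_nonspace _ _ hx, rstrip_cons_space]
          have ihe : List.intercalate [' '] (pvWords r []) = PySem.Chars.rstrip (pvG r true) := by
            simpa using ih hm' [] (by simp)
          rcases hw : pvWords r [] with _ | ⟨a, L⟩
          · rw [hw] at ihe
            simp only [List.intercalate, List.intersperse] at ihe
            simp [← ihe, List.intercalate]
          · have ha : a ≠ [] := pvWords_ne_nil r [] a (hw ▸ List.mem_cons_self)
            have hne : List.intercalate [' '] (a :: L) ≠ [] := by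
              rcases L with _ | ⟨b, L'⟩
              · simpa [List.intercalate]
              · simp [List.intercalate, List.intersperse]
            rw [hw] at ihe
            rw [← ihe]
            simp only [hne, reduceIte]
            have h2 : (' ' :: List.intercalate [' '] (a :: L)) ≠ [] := by simp
            simp only [h2, reduceIte]
            simp [List.intercalate, List.intersperse]
      · have hc' : (c == ' ') = false := by simpa using hc
        have hs : PySem.Chars.isspace c = false := by rw [hmc, hc']
        rw [pvWords, pvG]
        simp only [hs, Bool.false_eq_true, if_false, hc']
        have := ih hm' (c :: cur) (by
          intro x hx
          rcases List.mem_cons.mp hx with h | h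
          · subst h; exact hs
          · exact hcur x h)
        simpa using this

lemma lstrip_g (m : List Char) (hm : ∀ c ∈ m, PySem.Chars.isspace c = (c == ' ')) :
    List.dropWhile PySem.Chars.isspace (pvG m true) = pvG m true := by
  induction m with
  | nil => simp [pvG]
  | cons c r ih =>
      have hmc := hm c List.mem_cons_self
      have hm' : ∀ x ∈ r, PySem.Chars.isspace x = (x == ' ') :=
        fun x hx => hm x (List.mem_cons_of_mem _ hx)
      by_cases hc : c = ' '
      · subst hc
        simpa [pvG] using ih hm'
      · have hc' : (c == ' ') = false := by simpa using hc
        have hs : PySem.Chars.isspace c = false := by rw [hmc, hc']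
        simp [pvG, hc', hs]

-- ===== VERDICT (by name: the statement is the Claim_ definition above) =====
theorem format_job_location_spec : Claim_equal_format_job_location := by
  intro lr hdom
  have hdomc : ∀ c ∈ lr.toList, pvDomChar c = true := by
    simpa [Dom_format_job_location, pvDomStr, List.all_eq_true] using hdom
  unfold Spec_format_job_location format_job_location format_job_location_alt
  simp only [show (fun c => PySem.Chars.isalnum c || c == ',' || c == '-' || c == ' ') = pvKeep
    from rfl]
  set m := lr.toList.filter pvKeep with hmdef
  have hm : ∀ c ∈ m, PySem.Chars.isspace c = (c == ' ') := by
    intro c hc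
    exact pvKeep_isspace c (hdomc c (List.mem_filter.mp hc).1) (List.mem_filter.mp hc).2
  -- A's side: the fold produces ' ' :: pvG m true, and strip removes the sentinel space
  have hfold : lr.toList.foldl pvStepA [' '] = ' ' :: pvG m true := by
    rw [foldA_g lr.toList [' '] (by simp)]
    rw [show (PySem.List.pyGet? [' '] (-1) == some ' ') = true from by decide]
    simp [hmdef]
  have hA : PySem.Str.strip (String.ofList (lr.toList.foldl pvStepA [' '])) =
      String.ofList (PySem.Chars.rstrip (pvG m true)) := by
    rw [hfold]
    simp only [PySem.Str.strip, String.toList_ofList, PySem.Chars.strip, PySem.Chars.lstrip]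
    rw [List.dropWhile_cons]
    simp only [show PySem.Chars.isspace ' ' = true from by decide, reduceIte]
    rw [lstrip_g m hm]
  -- B's side: split₀/join compute intercalate of the words, which is rstrip (pvG m true)
  have hB : PySem.Str.join " " (PySem.Str.split₀ (String.ofList m)) =
      String.ofList (PySem.Chars.rstrip (pvG m true)) := by
    simp only [PySem.Str.join, PySem.Str.split₀, PySem.Chars.join, List.map_map,
      Function.comp_def, String.toList_ofList, List.map_id']
    rw [PySem.Chars.split₀, go_eq_words m [] []]
    have := intercalate_words_eq m hm [] (by simp)
    simp only [List.reverse_nil, List.nil_append, List.isEmpty_nil] at this ⊢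
    rw [show " ".toList = [' '] from rfl, this]
  rw [hA, hB]
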